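-- pv_equiv track=rewrite | github.com/collinsakenga/codewars_solutions | 6 kyu/Row of the odd triangle.py | odd_row
-- ===== SOURCE A (Python) =====
-- def odd_row(n):
--     start=1
--     res=[]
--     for i in range(1, n):
--         start+=2*i
--     for i in range(n):
--         res.append(start+2*i)
--     return res
-- ===== SOURCE B (Python) =====
-- def odd_row(n):
--     start = n * n - n + 1
--     return list(range(start, start + 2 * n, 2))
-- ===== Notes on version B (the rewrite author's own statement) =====
-- stated objective: simpler
-- what changed: Replaces the accumulation loop computing the row's first odd number and the append loop with the closed form start = n*n - n + 1 and a single arithmetic-progression range.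
import Mathlib
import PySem

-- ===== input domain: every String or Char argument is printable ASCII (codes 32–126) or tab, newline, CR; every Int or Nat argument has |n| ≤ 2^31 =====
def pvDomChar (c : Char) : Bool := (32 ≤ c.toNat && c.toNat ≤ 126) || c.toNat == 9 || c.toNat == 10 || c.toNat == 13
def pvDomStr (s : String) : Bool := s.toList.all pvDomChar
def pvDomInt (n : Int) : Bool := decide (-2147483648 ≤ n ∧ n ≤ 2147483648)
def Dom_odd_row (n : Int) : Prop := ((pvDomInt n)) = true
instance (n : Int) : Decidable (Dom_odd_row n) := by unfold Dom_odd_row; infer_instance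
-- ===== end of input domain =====

-- B replaces A's two loops by the closed form start = n*n - n + 1 and one range; objective: simpler.

-- ===== PORT A =====
def odd_row (n : Int) : List Int :=
  let start := (PySem.List.pyRange 1 n 1).foldl (fun s i => s + 2 * i) 1
  (PySem.List.pyRange 0 n 1).foldl (fun res i => res ++ [start + 2 * i]) []

-- ===== PORT B =====
def odd_row_alt (n : Int) : List Int :=
  let start := n * n - n + 1
  PySem.List.pyRange start (start + 2 * n) 2

-- ===== PRECONDITION & SPEC =====
def Spec_odd_row (n : Int) (out : List Int) : Prop := out = odd_row_alt n
instance (n : Int) (out : List Int) : Decidable (Spec_odd_row n out) := by unfold Spec_odd_row; infer_instance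

-- ===== CLAIM (what is proved, stated in full; the proofs are below) =====
def Claim_equal_odd_row : Prop := ∀ (n : Int), Dom_odd_row n → Spec_odd_row n (odd_row n)

-- ===== LEMMAS AND PROOFS =====

-- A's second loop builds acc ++ map f over the traversed list.
theorem foldl_append_singleton (f : Int → Int) (l : List Int) (acc : List Int) :
    l.foldl (fun res i => res ++ [f i]) acc = acc ++ l.map f := by
  induction l generalizing acc with
  | nil => simp
  | cons x xs ih => simp [List.foldl_cons, ih, List.append_assoc]

-- A's first loop: summing 2*(a+k) over range m starting from c.
theorem foldl_sum_range (m : Nat) (c : Int) :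
    (List.range m).foldl (fun (s : Int) (k : Nat) => s + 2 * (1 + (k : Int))) c = c + (m : Int) * (m + 1) := by
  induction m generalizing c with
  | zero => simp
  | succ m ih =>
      rw [List.range_succ, List.foldl_append]
      simp only [List.foldl_cons, List.foldl_nil, ih]
      push_cast
      ring

theorem odd_row_spec' (n : Int) : odd_row n = odd_row_alt n := by
  unfold odd_row odd_row_alt
  by_cases hn : n ≤ 0
  · rw [PySem.List.pyRange_one_eq_nil hn,
        PySem.List.pyRange_of_pos _ _ (by norm_num : (0:Int) < 2)]
    simp
    intro h
    omega
  · -- start value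
    have hs : (PySem.List.pyRange 1 n 1).foldl (fun s i => s + 2 * i) 1
        = n * n - n + 1 := by
      rw [PySem.List.pyRange_one, List.foldl_map]
      have := foldl_sum_range (n - 1).toNat 1
      simp only at this ⊢
      rw [this]
      have h1 : ((n - 1).toNat : Int) = n - 1 := by omega
      rw [h1]; ring
    rw [hs, foldl_append_singleton, List.nil_append,
        PySem.List.pyRange_one,
        PySem.List.pyRange_of_pos _ _ (by norm_num : (0:Int) < 2)]
    have hlt : n * n - n + 1 < n * n - n + 1 + 2 * n := by omega
    rw [if_pos hlt]
    have hq : ((n * n - n + 1 + 2 * n - (n * n - n + 1) + 2 - 1) / 2) = n := by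
      have : n * n - n + 1 + 2 * n - (n * n - n + 1) + 2 - 1 = 2 * n + 1 := by ring
      rw [this]; omega
    rw [hq]
    have : ((n - 0).toNat) = n.toNat := by omega
    rw [this]
    rw [List.map_map]
    apply List.map_congr_left
    intro k _
    simp only [Function.comp]
    ring

-- ===== VERDICT (by name: the statement is the Claim_ definition above) =====
theorem odd_row_spec : Claim_equal_odd_row := by
  intro n _
  exact odd_row_spec' n
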